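-- pv_equiv track=rewrite | github.com/chinhegde/Leetcode-Coding-Solutions | Python Solutions/EqualFrequency.py | equalFrequency
-- ===== SOURCE A (Python) =====
-- from collections import Counter
--
-- def equalFrequency(word: str) -> bool:
--     counts = Counter(word)
--
--     for key in counts.copy():
--         counts[key] -= 1
--
--         if counts[key] == 0:
--             del counts[key]
--
--         if len(set(counts.values())) == 1:
--             return True
--
--         counts[key] += 1
--
--     return False
-- ===== SOURCE B (Python) =====
-- from collections import Counter
--
-- def equalFrequency(word: str) -> bool:
--     # Histogram of frequencies: decide in O(1) from the (distinct-frequency) shape.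
--     counts = Counter(word)
--     freq = Counter(counts.values())
--     vals = sorted(freq)
--     if len(vals) == 1:
--         f = vals[0]
--         k = freq[f]
--         return (f == 1 and k >= 2) or (k == 1 and f >= 2)
--     if len(vals) == 2:
--         lo, hi = vals
--         return (hi == lo + 1 and freq[hi] == 1) or (lo == 1 and freq[lo] == 1)
--     return False
-- ===== Notes on version B (the rewrite author's own statement) =====
-- stated objective: alternative
-- what changed: Instead of trying to delete each distinct letter in turn and re-deriving the value set each time, B builds a histogram of the letter frequencies and decides by a closed-form case analysis on the one or two distinct frequencies.
import Mathlib
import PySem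

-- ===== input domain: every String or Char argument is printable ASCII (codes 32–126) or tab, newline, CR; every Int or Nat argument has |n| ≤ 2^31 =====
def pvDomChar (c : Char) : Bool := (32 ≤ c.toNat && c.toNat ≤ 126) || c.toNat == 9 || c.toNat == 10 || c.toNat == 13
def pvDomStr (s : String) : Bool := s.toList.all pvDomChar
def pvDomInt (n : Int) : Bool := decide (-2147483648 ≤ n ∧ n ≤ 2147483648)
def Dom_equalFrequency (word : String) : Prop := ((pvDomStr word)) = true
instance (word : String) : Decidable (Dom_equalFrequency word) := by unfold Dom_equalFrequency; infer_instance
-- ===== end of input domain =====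

-- B replaces A's loop that tries deleting each distinct letter (re-deriving the value set each time)
-- by a closed-form case analysis on the histogram of the letter frequencies; same return value everywhere.

-- ===== PORT A =====
def loopA (counts : PySem.Dict Char Int) : List Char → Bool
  | [] => false
  | key :: rest =>
    let c1 := counts.modify key 0 (· - 1)
    let c2 := if c1.getD key 0 == 0 then c1.erase key else c1
    if (PySem.Set.ofList c2.values).length == 1 then true
    else loopA (c2.modify key 0 (· + 1)) rest

def equalFrequency (word : String) : Bool :=
  let counts := PySem.Dict.counter word.toList
  loopA counts counts.keys

-- ===== PORT B =====
def equalFrequency_alt (word : String) : Bool :=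
  let counts := PySem.Dict.counter word.toList
  let freq := PySem.Dict.counter counts.values
  let vals := PySem.List.sorted freq.keys (fun x => x) false
  match vals with
  | [f] => (f == 1 && decide (2 ≤ freq.getD f 0)) || (freq.getD f 0 == 1 && decide (2 ≤ f))
  | [lo, hi] => (hi == lo + 1 && freq.getD hi 0 == 1) || (lo == 1 && freq.getD lo 0 == 1)
  | _ => false

-- ===== PRECONDITION & SPEC =====
def Spec_equalFrequency (word : String) (out : Bool) : Prop := out = equalFrequency_alt word
instance (word : String) (out : Bool) : Decidable (Spec_equalFrequency word out) := by unfold Spec_equalFrequency; infer_instance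

-- ===== CLAIM (what is proved, stated in full; the proofs are below) =====
def Claim_equal_equalFrequency : Prop := ∀ (word : String), Dom_equalFrequency word → Spec_equalFrequency word (equalFrequency word)

-- ===== LEMMAS AND PROOFS =====

/-- `set(l)` has exactly one element. -/
def pvOneD (l : List Int) : Prop := ∃ a, a ∈ l ∧ ∀ x ∈ l, x = a

/-- A's per-key test: `len(set(values)) == 1`. -/
def pvChk (l : List Int) : Bool := (PySem.Set.ofList l).length == 1

/-- The multiset of counter values after decrementing one letter of frequency `v` (dropping zero). -/
def pvDec (v : Int) (vs : List Int) : List Int := if v = 1 then vs.erase 1 else (v - 1) :: vs.erase v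

/-- B's decision as a function of the value list of the letter counter. -/
def pvShape (vs : List Int) : Bool :=
  match PySem.List.sorted (PySem.Set.ofList vs) (fun x => x) false with
  | [f] => (f == 1 && decide (2 ≤ ((vs.count f : Nat) : Int))) || (((vs.count f : Nat) : Int) == 1 && decide (2 ≤ f))
  | [lo, hi] => (hi == lo + 1 && ((vs.count hi : Nat) : Int) == 1) || (lo == 1 && ((vs.count lo : Nat) : Int) == 1)
  | _ => false

lemma pv_single (vs : List Int) (f : Int) (hall : ∀ x ∈ vs, x = f) (hf : f ∈ vs) (h1 : 1 ≤ f) :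
    pvOneD (pvDec f vs) ↔ (f = 1 ∧ 2 ≤ vs.count f) ∨ (vs.count f = 1 ∧ 2 ≤ f) := by
  have hcl : vs.count f = vs.length := List.count_eq_length.mpr (fun b hb => (hall b hb).symm)
  have hcpos : 0 < vs.count f := List.count_pos_iff.mpr hf
  by_cases hf1 : f = 1
  · subst hf1
    unfold pvDec
    rw [if_pos rfl]
    constructor
    · rintro ⟨a, ha, -⟩
      have hlen := List.length_erase_of_mem hf
      have : 0 < (vs.erase 1).length := List.length_pos_iff.mpr (by intro h; rw [h] at ha; exact List.not_mem_nil ha)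
      left; exact ⟨rfl, by omega⟩
    · rintro (⟨-, h2⟩ | ⟨h1', h2⟩)
      · have hlen := List.length_erase_of_mem hf
        have hpos : 0 < (vs.erase 1).length := by omega
        obtain ⟨a, ha⟩ := List.exists_mem_of_length_pos hpos
        exact ⟨a, ha, fun x hx => by
          rw [hall x (List.mem_of_mem_erase hx), hall a (List.mem_of_mem_erase ha)]⟩
      · omega
  · unfold pvDec
    rw [if_neg hf1]
    constructor
    · rintro ⟨a, ha, hall2⟩
      have haf : f - 1 = a := hall2 (f - 1) List.mem_cons_self
      right
      refine ⟨?_, by omega⟩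
      by_contra hne
      have h2 : 2 ≤ vs.count f := by omega
      have hlen := List.length_erase_of_mem hf
      have hpos : 0 < (vs.erase f).length := by omega
      obtain ⟨b, hb⟩ := List.exists_mem_of_length_pos hpos
      have hbf : b = f := hall b (List.mem_of_mem_erase hb)
      have : b = a := hall2 b (List.mem_cons_of_mem _ hb)
      omega
    · rintro (⟨hff, -⟩ | ⟨hn, -⟩)
      · exact absurd hff hf1
      · have hlen := List.length_erase_of_mem hf
        have : (vs.erase f).length = 0 := by omega
        have he : vs.erase f = [] := List.eq_nil_of_length_eq_zero this
        refine ⟨f - 1, List.mem_cons_self, ?_⟩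
        intro x hx
        rcases List.mem_cons.mp hx with h | h
        · exact h
        · rw [he] at h; exact absurd h List.not_mem_nil

lemma pv_hi (vs : List Int) (lo hi : Int) (hmem : ∀ x ∈ vs, x = lo ∨ x = hi)
    (hlo : lo ∈ vs) (hhi : hi ∈ vs) (h1 : 1 ≤ lo) (hlt : lo < hi) :
    pvOneD (pvDec hi vs) ↔ (hi = lo + 1 ∧ vs.count hi = 1) := by
  have hne : lo ≠ hi := ne_of_lt hlt
  have hhi1 : hi ≠ 1 := by omega
  unfold pvDec
  rw [if_neg hhi1]
  have hloe : lo ∈ vs.erase hi := (List.mem_erase_of_ne hne).mpr hlo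
  constructor
  · rintro ⟨a, -, hall2⟩
    have h1a : hi - 1 = a := hall2 _ List.mem_cons_self
    have hlo_a : lo = a := hall2 _ (List.mem_cons_of_mem _ hloe)
    refine ⟨by omega, ?_⟩
    have hcpos : 0 < vs.count hi := List.count_pos_iff.mpr hhi
    by_contra hc
    have h2 : 2 ≤ vs.count hi := by omega
    have : 0 < (vs.erase hi).count hi := by
      rw [List.count_erase]
      simp only [beq_self_eq_true, if_pos]
      omega
    have hmem2 : hi ∈ vs.erase hi := List.count_pos_iff.mp this
    have : hi = a := hall2 _ (List.mem_cons_of_mem _ hmem2)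
    omega
  · rintro ⟨heq, hc1⟩
    refine ⟨hi - 1, List.mem_cons_self, ?_⟩
    intro x hx
    rcases List.mem_cons.mp hx with h | h
    · exact h
    · rcases hmem x (List.mem_of_mem_erase h) with rfl | rfl
      · omega
      · exfalso
        have : (vs.erase x).count x = 0 := by
          rw [List.count_erase]; simp only [beq_self_eq_true, if_pos]; omega
        have := List.count_pos_iff.mpr h
        omega

lemma pv_lo (vs : List Int) (lo hi : Int) (hmem : ∀ x ∈ vs, x = lo ∨ x = hi)
    (hlo : lo ∈ vs) (hhi : hi ∈ vs) (h1 : 1 ≤ lo) (hlt : lo < hi) :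
    pvOneD (pvDec lo vs) ↔ (lo = 1 ∧ vs.count lo = 1) := by
  have hne : hi ≠ lo := ne_of_gt hlt
  unfold pvDec
  by_cases hlo1 : lo = 1
  · subst hlo1
    rw [if_pos rfl]
    have hhie : hi ∈ vs.erase 1 := (List.mem_erase_of_ne (by omega)).mpr hhi
    constructor
    · rintro ⟨a, -, hall2⟩
      have hha : hi = a := hall2 _ hhie
      refine ⟨rfl, ?_⟩
      have hcpos : 0 < vs.count 1 := List.count_pos_iff.mpr hlo
      by_contra hc
      have : 0 < (vs.erase 1).count 1 := by
        rw [List.count_erase]; simp only [beq_self_eq_true, if_pos]; omega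
      have : (1:Int) = a := hall2 _ (List.count_pos_iff.mp this)
      omega
    · rintro ⟨-, hc1⟩
      refine ⟨hi, hhie, ?_⟩
      intro x hx
      rcases hmem x (List.mem_of_mem_erase hx) with h | h
      · exfalso
        rw [h] at hx
        have : (vs.erase 1).count 1 = 0 := by
          rw [List.count_erase]; simp only [beq_self_eq_true, if_pos]; omega
        have := List.count_pos_iff.mpr hx
        omega
      · exact h
  · rw [if_neg hlo1]
    constructor
    · rintro ⟨a, -, hall2⟩
      have h1a : lo - 1 = a := hall2 _ List.mem_cons_self
      have hhie : hi ∈ vs.erase lo := (List.mem_erase_of_ne hne).mpr hhi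
      have : hi = a := hall2 _ (List.mem_cons_of_mem _ hhie)
      omega
    · rintro ⟨hc, -⟩
      exact absurd hc hlo1

lemma pv_not (vs : List Int) (v x y : Int) (hx : x ∈ vs) (hy : y ∈ vs)
    (hxy : x ≠ y) (hxv : x ≠ v) (hyv : y ≠ v) : ¬ pvOneD (pvDec v vs) := by
  rintro ⟨a, -, hall⟩
  have hmx : x ∈ vs.erase v := (List.mem_erase_of_ne hxv).mpr hx
  have hmy : y ∈ vs.erase v := (List.mem_erase_of_ne hyv).mpr hy
  unfold pvDec at hall
  by_cases hv : v = 1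
  · subst hv
    rw [if_pos rfl] at hall
    exact hxy ((hall x hmx).trans (hall y hmy).symm)
  · rw [if_neg hv] at hall
    exact hxy ((hall x (List.mem_cons_of_mem _ hmx)).trans (hall y (List.mem_cons_of_mem _ hmy)).symm)

lemma pvChk_iff (l : List Int) : pvChk l = true ↔ pvOneD l := by
  unfold pvChk pvOneD
  rw [beq_iff_eq, List.length_eq_one_iff]
  constructor
  · rintro ⟨a, ha⟩
    refine ⟨a, ?_, ?_⟩
    · have : a ∈ PySem.Set.ofList l := by rw [ha]; simp
      exact (PySem.Set.mem_ofList l a).mp this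
    · intro x hx
      have : x ∈ PySem.Set.ofList l := (PySem.Set.mem_ofList l x).mpr hx
      rw [ha] at this; simpa using this
  · rintro ⟨a, ha, hall⟩
    refine ⟨a, ?_⟩
    have hnd := PySem.Set.nodup_ofList l
    have hmem : ∀ x, x ∈ PySem.Set.ofList l ↔ x ∈ [a] := by
      intro x
      rw [PySem.Set.mem_ofList]
      simp only [List.mem_singleton]
      exact ⟨fun h => hall x h, fun h => h ▸ ha⟩
    exact List.perm_singleton.mp ((List.perm_ext_iff_of_nodup hnd (by simp)).mpr hmem)

lemma pv_main_aux (vs L : List Int) (hpos : ∀ v ∈ vs, 1 ≤ v)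
    (hmem : ∀ x, x ∈ L ↔ x ∈ vs) (hnd : L.Nodup) (hle : L.Pairwise (· ≤ ·)) :
    vs.any (fun v => pvChk (pvDec v vs)) =
      (match L with
      | [f] => (f == 1 && decide (2 ≤ ((vs.count f : Nat) : Int))) || (((vs.count f : Nat) : Int) == 1 && decide (2 ≤ f))
      | [lo, hi] => (hi == lo + 1 && ((vs.count hi : Nat) : Int) == 1) || (lo == 1 && ((vs.count lo : Nat) : Int) == 1)
      | _ => false) := by
  match L, hmem, hnd, hle with
  | [], hmem, _, _ =>
    have hvs : vs = [] := by
      cases vs with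
      | nil => rfl
      | cons x t => exact absurd ((hmem x).mpr List.mem_cons_self) List.not_mem_nil
    subst hvs; rfl
  | [f], hmem, _, _ =>
    have hf : f ∈ vs := (hmem f).mp List.mem_cons_self
    have hall : ∀ x ∈ vs, x = f := fun x hx => by
      have := (hmem x).mpr hx; simpa using this
    have h1 : 1 ≤ f := hpos f hf
    rw [Bool.eq_iff_iff]
    simp only [List.any_eq_true, Bool.or_eq_true, Bool.and_eq_true, beq_iff_eq,
      decide_eq_true_iff]
    constructor
    · rintro ⟨v, hv, hone⟩
      rw [pvChk_iff, hall v hv] at hone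
      rcases (pv_single vs f hall hf h1).mp hone with ⟨h, h2⟩ | ⟨h, h2⟩
      · left; exact ⟨h, by omega⟩
      · right; exact ⟨by omega, by omega⟩
    · intro h
      refine ⟨f, hf, ?_⟩
      rw [pvChk_iff]
      refine (pv_single vs f hall hf h1).mpr ?_
      rcases h with ⟨h, h2⟩ | ⟨h, h2⟩
      · left; exact ⟨h, by omega⟩
      · right; exact ⟨by omega, by omega⟩
  | [lo, hi], hmem, hnd, hle =>
    have hlo : lo ∈ vs := (hmem lo).mp List.mem_cons_self
    have hhi : hi ∈ vs := (hmem hi).mp (List.mem_cons_of_mem _ List.mem_cons_self)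
    have hmem2 : ∀ x ∈ vs, x = lo ∨ x = hi := fun x hx => by
      have := (hmem x).mpr hx; simpa using this
    have hlt : lo < hi := by
      have hle' : lo ≤ hi := by
        have := List.pairwise_cons.mp hle
        exact this.1 hi List.mem_cons_self
      have hne : lo ≠ hi := by
        have := List.nodup_cons.mp hnd
        simpa using this.1
      omega
    have h1 : 1 ≤ lo := hpos lo hlo
    rw [Bool.eq_iff_iff]
    simp only [List.any_eq_true, Bool.or_eq_true, Bool.and_eq_true, beq_iff_eq]
    constructor
    · rintro ⟨v, hv, hone⟩
      rw [pvChk_iff] at hone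
      rcases hmem2 v hv with rfl | rfl
      · rcases (pv_lo vs v hi hmem2 hlo hhi h1 hlt).mp hone with ⟨h, h2⟩
        right; exact ⟨h, by omega⟩
      · rcases (pv_hi vs lo v hmem2 hlo hhi h1 hlt).mp hone with ⟨h, h2⟩
        left; exact ⟨h, by omega⟩
    · intro h
      rcases h with ⟨h, h2⟩ | ⟨h, h2⟩
      · refine ⟨hi, hhi, ?_⟩
        rw [pvChk_iff]
        exact (pv_hi vs lo hi hmem2 hlo hhi h1 hlt).mpr ⟨h, by omega⟩
      · refine ⟨lo, hlo, ?_⟩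
        rw [pvChk_iff]
        exact (pv_lo vs lo hi hmem2 hlo hhi h1 hlt).mpr ⟨h, by omega⟩
  | a :: b :: c :: rest, hmem, hnd, hle =>
    have ha : a ∈ vs := (hmem a).mp List.mem_cons_self
    have hb : b ∈ vs := (hmem b).mp (List.mem_cons_of_mem _ List.mem_cons_self)
    have hc : c ∈ vs := (hmem c).mp (List.mem_cons_of_mem _ (List.mem_cons_of_mem _ List.mem_cons_self))
    have hab : a ≠ b := by
      have := List.nodup_cons.mp hnd; simp at this; tauto
    have hac : a ≠ c := by
      have := List.nodup_cons.mp hnd; simp at this; tauto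
    have hbc : b ≠ c := by
      have := (List.nodup_cons.mp hnd).2; simp at this; tauto
    show vs.any (fun v => pvChk (pvDec v vs)) = false
    rw [List.any_eq_false]
    intro v hv hone
    rw [pvChk_iff] at hone
    rcases eq_or_ne v a with rfl | hva
    · exact pv_not vs v b c hb hc hbc (Ne.symm hab) (Ne.symm hac) hone
    · rcases eq_or_ne v b with rfl | hvb
      · exact pv_not vs v a c ha hc hac (Ne.symm hva) (Ne.symm hbc) hone
      · exact pv_not vs v a b ha hb hab (Ne.symm hva) (Ne.symm hvb) hone

lemma pv_main (vs : List Int) (hpos : ∀ v ∈ vs, 1 ≤ v) :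
    vs.any (fun v => pvChk (pvDec v vs)) = pvShape vs := by
  unfold pvShape
  have hperm := PySem.List.sorted_perm (PySem.Set.ofList vs) (fun x => x) false
  refine pv_main_aux vs _ hpos ?_ ?_ ?_
  · intro x
    rw [hperm.mem_iff, PySem.Set.mem_ofList]
  · exact hperm.nodup_iff.mpr (PySem.Set.nodup_ofList vs)
  · simpa using PySem.List.sorted_pairwise (PySem.Set.ofList vs) (fun x => x)

lemma pvChk_perm {l l' : List Int} (h : l.Perm l') : pvChk l = pvChk l' := by
  unfold pvChk
  have : (PySem.Set.ofList l).Perm (PySem.Set.ofList l') :=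
    (List.perm_ext_iff_of_nodup (PySem.Set.nodup_ofList l) (PySem.Set.nodup_ofList l')).mpr
      (fun a => by rw [PySem.Set.mem_ofList, PySem.Set.mem_ofList]; exact h.mem_iff)
  rw [this.length_eq]

lemma pv_getD_eq_of_items_perm (d d' : PySem.Dict Char Int) (k : Char) (x : Int)
    (hnd' : d'.keys.Nodup) (h : d.items.Perm d'.items) :
    d.getD k x = d'.getD k x := by
  cases hg : d.get? k with
  | none =>
    have hk : k ∉ d.keys := (PySem.Dict.get?_eq_none_iff_not_mem_keys d k).mp hg
    have hkeys : d.keys.Perm d'.keys := by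
      simp only [PySem.Dict.keys]; exact h.map _
    have hk' : k ∉ d'.keys := fun hm => hk (hkeys.mem_iff.mpr hm)
    rw [PySem.Dict.getD_eq_get?_getD, PySem.Dict.getD_eq_get?_getD, hg,
      (PySem.Dict.get?_eq_none_iff_not_mem_keys d' k).mpr hk']
  | some v =>
    have hm : (k, v) ∈ d.items := PySem.Dict.mem_items_of_get?_eq_some d hg
    have hm' : (k, v) ∈ d'.items := h.mem_iff.mp hm
    rw [PySem.Dict.getD_eq_get?_getD, PySem.Dict.getD_eq_get?_getD, hg,
      PySem.Dict.get?_of_mem_items d' hm' hnd']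

lemma pv_loopA_eq (w : List Char) (keys : List Char) (d : PySem.Dict Char Int)
    (hnd : d.keys.Nodup) (hperm : d.items.Perm (PySem.Dict.counter w).items)
    (hsub : ∀ k ∈ keys, k ∈ PySem.Set.ofList w) :
    loopA d keys
      = keys.any (fun k => pvChk (pvDec ((w.count k : Nat) : Int) (PySem.Dict.counter w).values)) := by
  induction keys generalizing d with
  | nil => rfl
  | cons key rest ih =>
    have hkey : key ∈ PySem.Set.ofList w := hsub key List.mem_cons_self
    have hkw : key ∈ w := (PySem.Set.mem_ofList w key).mp hkey
    have hF1 : 1 ≤ w.count key := List.count_pos_iff.mpr hkw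
    have hndk : (PySem.Set.ofList w).Nodup := PySem.Set.nodup_ofList w
    have hcnt_items : (PySem.Dict.counter w).items
        = (PySem.Set.ofList w).map (fun k => (k, (w.count k : Int))) := PySem.Dict.items_counter w
    have hkperm : d.keys.Perm (PySem.Set.ofList w) := by
      have h : d.keys.Perm (PySem.Dict.counter w).keys := by
        simp only [PySem.Dict.keys]; exact hperm.map _
      rwa [PySem.Dict.keys_counter] at h
    have hdk : key ∈ d.keys := hkperm.mem_iff.mpr hkey
    have hcont : d.contains key = true := (PySem.Dict.contains_iff_mem_keys d key).mpr hdk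
    have hgetd : d.getD key 0 = ((w.count key : Nat) : Int) := by
      rw [pv_getD_eq_of_items_perm d (PySem.Dict.counter w) key 0 (PySem.Dict.nodup_keys_counter w) hperm,
        PySem.Dict.getD_counter]
    have hc1 : d.modify key 0 (· - 1) = d.insert key (((w.count key : Nat) : Int) - 1) := by
      show d.insert key (d.getD key 0 - 1) = _
      rw [hgetd]
    have hg1 : (d.insert key (((w.count key : Nat) : Int) - 1)).getD key 0
        = ((w.count key : Nat) : Int) - 1 :=
      PySem.Dict.getD_insert_self d key _ 0
    have hEne : ∀ k ∈ (PySem.Set.ofList w).erase key, k ≠ key :=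
      fun k hk => (hndk.mem_erase_iff.mp hk).1
    have hkse : (PySem.Set.ofList w).Perm (key :: (PySem.Set.ofList w).erase key) :=
      List.perm_cons_erase hkey
    have hitems1 : (d.insert key (((w.count key : Nat) : Int) - 1)).items.Perm
        ((key, ((w.count key : Nat) : Int) - 1)
          :: ((PySem.Set.ofList w).erase key).map (fun k => (k, (w.count k : Int)))) := by
      rw [PySem.Dict.items_insert_of_contains d _ hcont]
      have h1 : d.items.Perm ((PySem.Set.ofList w).map (fun k => (k, (w.count k : Int)))) := by
        rw [← hcnt_items]; exact hperm
      refine (h1.map _).trans ?_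
      rw [List.map_map]
      refine (hkse.map _).trans ?_
      rw [List.map_cons]
      have h2 : ((fun p : Char × Int => if p.1 == key then (key, ((w.count key : Nat) : Int) - 1) else p) ∘
          (fun k => (k, (w.count k : Int)))) key = (key, ((w.count key : Nat) : Int) - 1) := by
        simp
      rw [h2]
      have h3 : ((PySem.Set.ofList w).erase key).map
            ((fun p : Char × Int => if p.1 == key then (key, ((w.count key : Nat) : Int) - 1) else p) ∘
              (fun k => (k, (w.count k : Int))))
          = ((PySem.Set.ofList w).erase key).map (fun k => (k, (w.count k : Int))) := by
        refine List.map_congr_left ?_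
        intro k hk
        have : (k == key) = false := by
          simp [hEne k hk]
        simp [Function.comp, this]
      rw [h3]
    have hvals1 : (d.insert key (((w.count key : Nat) : Int) - 1)).values.Perm
        ((((w.count key : Nat) : Int) - 1)
          :: ((PySem.Set.ofList w).erase key).map (fun k => (w.count k : Int))) := by
      simp only [PySem.Dict.values]
      have h := hitems1.map (Prod.snd)
      rw [List.map_cons, List.map_map] at h
      simpa using h
    have hvs_eq : (PySem.Dict.counter w).values
        = (PySem.Set.ofList w).map (fun k => (w.count k : Int)) := by
      simp only [PySem.Dict.values, hcnt_items, List.map_map]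
      rfl
    have hvsperm : (PySem.Dict.counter w).values.Perm
        (((w.count key : Nat) : Int) :: ((PySem.Set.ofList w).erase key).map (fun k => (w.count k : Int))) := by
      rw [hvs_eq]
      have h := hkse.map (fun k => (w.count k : Int))
      simpa using h
    have hFin : ((w.count key : Nat) : Int) ∈ (PySem.Dict.counter w).values :=
      hvsperm.mem_iff.mpr List.mem_cons_self
    have herase : (((PySem.Set.ofList w).erase key).map (fun k => (w.count k : Int))).Perm
        ((PySem.Dict.counter w).values.erase ((w.count key : Nat) : Int)) :=
      List.Perm.cons_inv (hvsperm.symm.trans (List.perm_cons_erase hFin))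
    show (if (PySem.Set.ofList (if (d.modify key 0 (· - 1)).getD key 0 == 0
              then (d.modify key 0 (· - 1)).erase key
              else d.modify key 0 (· - 1)).values).length == 1
          then true
          else loopA ((if (d.modify key 0 (· - 1)).getD key 0 == 0
              then (d.modify key 0 (· - 1)).erase key
              else d.modify key 0 (· - 1)).modify key 0 (· + 1)) rest) = _
    rw [hc1, hg1, List.any_cons]
    by_cases hFone : w.count key = 1
    · have hcond : ((((w.count key : Nat) : Int) - 1) == 0) = true := by
        simp [hFone]
      rw [if_pos hcond]
      have hitems2 : ((d.insert key (((w.count key : Nat) : Int) - 1)).erase key).items.Perm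
          (((PySem.Set.ofList w).erase key).map (fun k => (k, (w.count k : Int)))) := by
        show ((d.insert key (((w.count key : Nat) : Int) - 1)).items.filter
            (fun p => !(p.1 == key))).Perm _
        refine (hitems1.filter _).trans ?_
        rw [List.filter_cons]
        simp only [beq_self_eq_true, Bool.not_true, Bool.false_eq_true, if_false]
        rw [List.filter_eq_self.mpr]
        rintro ⟨k, v⟩ hp
        rcases List.mem_map.mp hp with ⟨k', hk', hek⟩
        have hkk : k = k' := by
          have := congrArg Prod.fst hek
          simpa using this.symm
        subst hkk
        simp [hEne k hk']
      have hvals2 : ((d.insert key (((w.count key : Nat) : Int) - 1)).erase key).values.Perm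
          (pvDec ((w.count key : Nat) : Int) (PySem.Dict.counter w).values) := by
        have h := hitems2.map (Prod.snd)
        simp only [PySem.Dict.values]
        rw [List.map_map] at h
        have h2 : (((PySem.Set.ofList w).erase key).map
            (Prod.snd ∘ (fun k => (k, (w.count k : Int)))))
            = ((PySem.Set.ofList w).erase key).map (fun k => (w.count k : Int)) := rfl
        rw [h2] at h
        refine h.trans ?_
        unfold pvDec
        rw [if_pos (by exact_mod_cast congrArg (fun n : Nat => (n : Int)) hFone)]
        have : ((w.count key : Nat) : Int) = 1 := by exact_mod_cast hFone
        rw [← this]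
        exact herase
      have hchk : ((PySem.Set.ofList ((d.insert key (((w.count key : Nat) : Int) - 1)).erase key).values).length == 1)
          = pvChk (pvDec ((w.count key : Nat) : Int) (PySem.Dict.counter w).values) :=
        pvChk_perm hvals2
      rw [hchk]
      have hnc : ((d.insert key (((w.count key : Nat) : Int) - 1)).erase key).contains key = false := by
        apply Bool.eq_false_iff.mpr
        intro hcon
        have hm := (PySem.Dict.contains_iff_mem_keys _ key).mp hcon
        simp only [PySem.Dict.keys] at hm
        rcases List.mem_map.mp hm with ⟨p, hp, hp1⟩
        have hp' : p ∈ (d.insert key (((w.count key : Nat) : Int) - 1)).items.filter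
            (fun p => !(p.1 == key)) := hp
        have := (List.mem_filter.mp hp').2
        rw [hp1] at this
        simp at this
      have hd' : ((d.insert key (((w.count key : Nat) : Int) - 1)).erase key).modify key 0 (· + 1)
          = ((d.insert key (((w.count key : Nat) : Int) - 1)).erase key).insert key 1 := by
        show PySem.Dict.insert _ key (PySem.Dict.getD _ key 0 + 1) = _
        rw [PySem.Dict.getD_of_not_contains _ 0 hnc]
        norm_num
      rw [hd']
      have hitems3 : (((d.insert key (((w.count key : Nat) : Int) - 1)).erase key).insert key 1).items.Perm
          (PySem.Dict.counter w).items := by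
        rw [PySem.Dict.items_insert_of_not_contains _ 1 hnc]
        refine (List.perm_append_singleton _ _).trans ?_
        refine ((hitems2.cons _).trans ?_)
        have h1 : ((key, (1 : Int)) :: ((PySem.Set.ofList w).erase key).map (fun k => (k, (w.count k : Int))))
            = ((key :: (PySem.Set.ofList w).erase key).map (fun k => (k, (w.count k : Int)))) := by
          rw [List.map_cons]
          congr 1
          rw [hFone]
          rfl
        rw [h1, hcnt_items]
        exact (hkse.map _).symm
      have hnd3 : (((d.insert key (((w.count key : Nat) : Int) - 1)).erase key).insert key 1).keys.Nodup := by
        have h : (((d.insert key (((w.count key : Nat) : Int) - 1)).erase key).insert key 1).keys.Perm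
            (PySem.Dict.counter w).keys := by
          simp only [PySem.Dict.keys]; exact hitems3.map _
        exact h.nodup_iff.mpr (PySem.Dict.nodup_keys_counter w)
      rw [ih _ hnd3 hitems3 (fun k hk => hsub k (List.mem_cons_of_mem _ hk))]
      cases pvChk (pvDec ((w.count key : Nat) : Int) (PySem.Dict.counter w).values) <;> simp
    · have hcond : ((((w.count key : Nat) : Int) - 1) == 0) = false := by
        simp only [beq_eq_false_iff_ne, ne_eq]
        intro h
        have : w.count key = 1 := by omega
        exact hFone this
      have hcond' : ¬(((((w.count key : Nat) : Int) - 1) == 0) = true) := by simp [hcond]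
      rw [if_neg hcond']
      have hvals2 : (d.insert key (((w.count key : Nat) : Int) - 1)).values.Perm
          (pvDec ((w.count key : Nat) : Int) (PySem.Dict.counter w).values) := by
        refine hvals1.trans ?_
        unfold pvDec
        rw [if_neg (by intro h; exact hFone (by exact_mod_cast h))]
        exact herase.cons _
      have hchk : ((PySem.Set.ofList (d.insert key (((w.count key : Nat) : Int) - 1)).values).length == 1)
          = pvChk (pvDec ((w.count key : Nat) : Int) (PySem.Dict.counter w).values) :=
        pvChk_perm hvals2
      rw [hchk]
      have hd' : (d.insert key (((w.count key : Nat) : Int) - 1)).modify key 0 (· + 1) = d := by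
        show PySem.Dict.insert _ key (PySem.Dict.getD _ key 0 + 1) = _
        rw [hg1]
        have h1 : ((w.count key : Nat) : Int) - 1 + 1 = ((w.count key : Nat) : Int) := by ring
        rw [h1, PySem.Dict.insert_insert_self]
        apply PySem.Dict.ext
        rw [PySem.Dict.items_insert_of_contains d _ hcont]
        have h2 : ∀ p ∈ d.items,
            (if p.1 == key then (key, ((w.count key : Nat) : Int)) else p) = p := by
          rintro ⟨k, v⟩ hp
          by_cases hk : k = key
          · subst hk
            simp only [beq_self_eq_true, if_true]
            have hg : d.get? k = some v := PySem.Dict.get?_of_mem_items d hp hnd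
            have hgd : d.getD k 0 = v := by
              rw [PySem.Dict.getD_eq_get?_getD, hg]
              rfl
            rw [hgd] at hgetd
            rw [hgetd]
          · simp [hk]
        rw [List.map_congr_left h2]; exact List.map_id _
      rw [hd', ih d hnd hperm (fun k hk => hsub k (List.mem_cons_of_mem _ hk))]
      cases pvChk (pvDec ((w.count key : Nat) : Int) (PySem.Dict.counter w).values) <;> simp

lemma pv_A_eq (word : String) :
    equalFrequency word
      = ((PySem.Dict.counter word.toList).values).any
          (fun v => pvChk (pvDec v (PySem.Dict.counter word.toList).values)) := by
  show loopA (PySem.Dict.counter word.toList) (PySem.Dict.counter word.toList).keys = _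
  rw [pv_loopA_eq word.toList (PySem.Dict.counter word.toList).keys (PySem.Dict.counter word.toList)
    (PySem.Dict.nodup_keys_counter word.toList) (List.Perm.refl _)
    (fun k hk => by rwa [PySem.Dict.keys_counter] at hk)]
  have hvs : (PySem.Dict.counter word.toList).values
      = (PySem.Set.ofList word.toList).map (fun k => (word.toList.count k : Int)) := by
    simp only [PySem.Dict.values, PySem.Dict.items_counter, List.map_map]
    rfl
  conv_rhs => rw [hvs, List.any_map]
  rw [PySem.Dict.keys_counter]
  simp only [Function.comp_def, ← hvs]

lemma pv_B_eq (word : String) :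
    equalFrequency_alt word = pvShape (PySem.Dict.counter word.toList).values := by
  unfold equalFrequency_alt pvShape
  simp only [PySem.Dict.keys_counter, PySem.Dict.getD_counter]

-- ===== VERDICT (by name: the statement is the Claim_ definition above) =====
theorem equalFrequency_spec : Claim_equal_equalFrequency := by
  intro word _
  show equalFrequency word = equalFrequency_alt word
  rw [pv_A_eq, pv_B_eq]
  apply pv_main
  intro v hv
  rw [PySem.Dict.values_eq_map_keys _ (PySem.Dict.nodup_keys_counter _) 0] at hv
  rcases List.mem_map.mp hv with ⟨k, hk, rfl⟩
  rw [PySem.Dict.getD_counter]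
  rw [PySem.Dict.keys_counter, PySem.Set.mem_ofList] at hk
  exact_mod_cast List.count_pos_iff.mpr hk
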